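-- pv_equiv track=rewrite | github.com/showjim/STDFReader | src/analysis.py | _list_duplicates_of
-- ===== SOURCE A (Python) =====
-- def _list_duplicates_of(seq, item, start_index):
--     """Find first duplicate pair of item in seq."""
--     start_at = -1
--     locs = []
--     while True:
--         try:
--             loc = seq.index(item, start_at + 1)
--         except ValueError:
--             break
--         else:
--             locs.append(start_index + loc)
--             start_at = loc
--             if len(locs) == 2:
--                 break
--     return locs
-- ===== SOURCE B (Python) =====
-- def _list_duplicates_of(seq, item, start_index):
--     """Find first duplicate pair of item in seq."""
--     return [start_index + i for i, x in enumerate(seq) if x == item][:2]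
-- ===== Notes on version B (the rewrite author's own statement) =====
-- stated objective: idiomatic
-- what changed: Replaced the while-True loop with try/except around resumed seq.index(item, start+1) calls and a break-at-two accumulator by a staged formulation: one comprehension collecting ALL matching positions, then slicing the first two with [:2].
import Mathlib
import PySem

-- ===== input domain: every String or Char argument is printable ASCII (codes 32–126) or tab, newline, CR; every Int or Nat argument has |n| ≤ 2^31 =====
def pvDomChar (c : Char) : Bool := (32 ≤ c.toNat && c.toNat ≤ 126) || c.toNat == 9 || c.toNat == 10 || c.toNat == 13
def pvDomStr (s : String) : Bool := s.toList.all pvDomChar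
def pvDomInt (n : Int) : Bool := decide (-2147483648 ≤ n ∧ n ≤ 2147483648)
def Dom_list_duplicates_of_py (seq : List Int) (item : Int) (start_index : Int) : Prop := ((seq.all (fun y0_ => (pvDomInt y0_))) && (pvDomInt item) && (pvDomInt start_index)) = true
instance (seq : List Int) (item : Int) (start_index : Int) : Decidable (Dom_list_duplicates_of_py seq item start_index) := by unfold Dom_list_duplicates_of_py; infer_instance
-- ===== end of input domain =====

-- B replaces A's while/try/except loop of resumed seq.index calls by a staged formulation:
-- collect ALL matching positions with a comprehension, then take the first two with [:2] (same O(n), plainer).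

-- ===== PORT A =====
-- seq.index(item, start) for a Nat start: first index ≥ start holding item, none = ValueError (exact)
def pyIndexFrom (seq : List Int) (item : Int) (start : Nat) : Option Nat :=
  (PySem.List.index? (seq.drop start) item).map (· + start)

-- A's while-loop performs at most two successful .index calls (it breaks when len(locs) == 2),
-- so it is transcribed as exactly those two iterations with the same intermediate values.
def list_duplicates_of_py (seq : List Int) (item : Int) (start_index : Int) : List Int :=
  -- iteration 1: start_at = -1, locs = []
  match pyIndexFrom seq item 0 with
  | none => []                                   -- ValueError: break with locs = []
  | some loc =>
    -- locs = [start_index + loc]; len(locs) = 1 ≠ 2, loop again with start_at = loc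
    match pyIndexFrom seq item (loc + 1) with
    | none => [start_index + (loc : Int)]        -- ValueError: break
    | some loc2 => [start_index + (loc : Int), start_index + (loc2 : Int)]  -- len = 2: break

-- ===== PORT B =====
-- the comprehension [start_index + i for i, x in enumerate(seq) if x == item], then the slice [:2]
def list_duplicates_of_py_alt (seq : List Int) (item : Int) (start_index : Int) : List Int :=
  PySem.List.slice
    ((PySem.List.enumerate seq 0).filterMap
      (fun p => if p.2 = item then some (start_index + p.1) else none))
    none (some 2)

-- ===== PRECONDITION & SPEC =====
def Spec_list_duplicates_of_py (seq : List Int) (item : Int) (start_index : Int) (out : List Int) : Prop := out = list_duplicates_of_py_alt seq item start_index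
instance (seq : List Int) (item : Int) (start_index : Int) (out : List Int) : Decidable (Spec_list_duplicates_of_py seq item start_index out) := by unfold Spec_list_duplicates_of_py; infer_instance

-- ===== CLAIM (what is proved, stated in full; the proofs are below) =====
def Claim_equal_list_duplicates_of_py : Prop := ∀ (seq : List Int) (item : Int) (start_index : Int), Dom_list_duplicates_of_py seq item start_index → Spec_list_duplicates_of_py seq item start_index (list_duplicates_of_py seq item start_index)

-- ===== LEMMAS AND PROOFS =====

-- the full list of match positions decomposes at the first occurrence found by index?
theorem filterMap_enum_eq (item start_index : Int) (seq : List Int) :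
    ∀ (s : Int),
      (PySem.List.enumerate seq s).filterMap
          (fun p => if p.2 = item then some (start_index + p.1) else none) =
        match PySem.List.index? seq item with
        | none => []
        | some l => (start_index + s + (l : Int)) ::
            (PySem.List.enumerate (seq.drop (l + 1)) (s + (l : Int) + 1)).filterMap
              (fun p => if p.2 = item then some (start_index + p.1) else none) := by
  induction seq with
  | nil => intro s; simp [PySem.List.enumerate_nil, PySem.List.index?]
  | cons x xs ih =>
    intro s
    rw [PySem.List.enumerate_cons]
    by_cases hx : x = item
    · subst hx
      rw [PySem.List.index?_cons_self]
      simp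
    · rw [PySem.List.index?_cons_of_ne _ hx]
      simp only [List.filterMap_cons, if_neg hx]
      rw [ih (s + 1)]
      cases h : PySem.List.index? xs item with
      | none => simp
      | some l =>
        simp only [Option.map_some, List.drop_succ_cons]
        have e1 : ((l + 1 : Nat) : Int) = (l : Int) + 1 := by push_cast; ring
        rw [e1]
        have e2 : start_index + (s + 1) + (l : Int) = start_index + s + ((l : Int) + 1) := by ring
        have e3 : s + 1 + (l : Int) + 1 = s + ((l : Int) + 1) + 1 := by ring
        rw [e2, e3]

-- ===== VERDICT (by name: the statement is the Claim_ definition above) =====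
theorem list_duplicates_of_py_spec : Claim_equal_list_duplicates_of_py := by
  intro seq item start_index _
  unfold Spec_list_duplicates_of_py list_duplicates_of_py list_duplicates_of_py_alt pyIndexFrom
  rw [PySem.List.slice_to _ (by omega : (0:Int) ≤ 2)]
  rw [filterMap_enum_eq]
  simp only [List.drop_zero]
  cases h1 : PySem.List.index? seq item with
  | none => simp
  | some l1 =>
    simp only [Option.map_some]
    rw [filterMap_enum_eq]
    cases h2 : PySem.List.index? (seq.drop (l1 + 1)) item with
    | none => simp
    | some l2 =>
      simp only [Option.map_some]
      rw [show ∀ (c d : Int) (r : List Int), List.take (Int.toNat 2) (c :: d :: r) = [c, d] from fun _ _ _ => rfl]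
      simp only [List.cons.injEq, and_true]
      exact ⟨by push_cast; ring, by push_cast; ring⟩
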